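-- pv_equiv track=rewrite | github.com/clifford-cheng/WealthPipeline | wealth_leads/management_bios.py | _merge_bio_dicts
-- ===== SOURCE A (Python) =====
-- def _merge_bio_dicts(rows: list[dict]) -> list[dict]:
--     byk: dict[str, dict] = {}
--     for r in rows:
--         k = r.get("person_name_norm") or ""
--         if not k:
--             continue
--         prev = byk.get(k)
--         if prev is None or len(r.get("bio_text") or "") > len(prev.get("bio_text") or ""):
--             byk[k] = r
--     return sorted(byk.values(), key=lambda x: (x.get("role_heading") or "", x.get("person_name") or ""))
-- ===== SOURCE B (Python) =====
-- def _merge_bio_dicts(rows: list[dict]) -> list[dict]: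
--     groups: dict[str, list[dict]] = {}
--     for r in rows:
--         k = r.get("person_name_norm") or ""
--         if k:
--             groups.setdefault(k, []).append(r)
--     chosen = [max(g, key=lambda r: len(r.get("bio_text") or "")) for g in groups.values()]
--     return sorted(chosen, key=lambda x: (x.get("role_heading") or "", x.get("person_name") or ""))
-- ===== Notes on version B (the rewrite author's own statement) =====
-- stated objective: alternative
-- what changed: B first groups all rows by name into lists (streaming no comparisons), then reduces each group with max(key=bio length) -- first maximal, matching A's keep-first-on-ties -- and sorts the chosen rows; A instead keeps a running best row per key while scanning.
import Mathlib
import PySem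

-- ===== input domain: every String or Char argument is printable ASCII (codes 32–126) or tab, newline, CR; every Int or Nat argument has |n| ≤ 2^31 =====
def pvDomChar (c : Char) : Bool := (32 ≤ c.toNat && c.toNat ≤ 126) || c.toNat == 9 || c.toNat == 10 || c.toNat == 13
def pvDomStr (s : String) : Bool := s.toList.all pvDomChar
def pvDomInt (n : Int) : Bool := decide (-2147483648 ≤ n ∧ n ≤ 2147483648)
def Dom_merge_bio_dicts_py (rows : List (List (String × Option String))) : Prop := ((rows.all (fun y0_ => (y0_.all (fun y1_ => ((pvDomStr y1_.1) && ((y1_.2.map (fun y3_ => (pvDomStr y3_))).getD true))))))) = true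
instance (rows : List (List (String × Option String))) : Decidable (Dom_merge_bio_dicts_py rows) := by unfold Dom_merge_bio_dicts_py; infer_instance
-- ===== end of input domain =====

-- B groups rows by name first and then reduces each group with max(key=bio length)
-- (first maximal element, i.e. A's keep-first-on-equal-length rule), instead of A's
-- running best-row-so-far dict; same sort at the end. Objective: alternative decomposition.

-- shared helper: `r.get(key) or ""` on a row dict (missing key or None or "" → "")
def pvGetS (r : List (String × Option String)) (key : String) : String :=
  match (PySem.Dict.mk r).get? key with
  | some (some s) => s
  | _ => ""

-- ===== PORT A =====
def merge_bio_dicts_py (rows : List (List (String × Option String))) : List (List (String × Option String)) :=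
  let byk : PySem.Dict String (List (String × Option String)) :=
    rows.foldl (fun byk r =>
      let k := pvGetS r "person_name_norm"
      if k == "" then byk
      else
        match byk.get? k with
        | none => byk.insert k r
        | some prev =>
          if PySem.Str.len (pvGetS prev "bio_text") < PySem.Str.len (pvGetS r "bio_text")
          then byk.insert k r else byk) (PySem.Dict.mk [])
  PySem.List.sorted2 byk.values (fun x => pvGetS x "role_heading") (fun x => pvGetS x "person_name")

-- ===== PORT B =====
-- len(r.get("bio_text") or "") — the max key in Source B
def pvBioLen (r : List (String × Option String)) : Int := PySem.Str.len (pvGetS r "bio_text")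

def merge_bio_dicts_py_alt (rows : List (List (String × Option String))) : List (List (String × Option String)) :=
  let groups : PySem.Dict String (List (List (String × Option String))) :=
    rows.foldl (fun g r =>
      let k := pvGetS r "person_name_norm"
      if k == "" then g
      else g.modify k [] (fun l => l ++ [r])) (PySem.Dict.mk [])
  let chosen := groups.values.map (fun grp => (PySem.List.max? grp pvBioLen).getD [])
  PySem.List.sorted2 chosen (fun x => pvGetS x "role_heading") (fun x => pvGetS x "person_name")

-- ===== PRECONDITION & SPEC =====
def Spec_merge_bio_dicts_py (rows : List (List (String × Option String))) (out : List (List (String × Option String))) : Prop := out = merge_bio_dicts_py_alt rows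
instance (rows : List (List (String × Option String))) (out : List (List (String × Option String))) : Decidable (Spec_merge_bio_dicts_py rows out) := by unfold Spec_merge_bio_dicts_py; infer_instance

-- ===== CLAIM (what is proved, stated in full; the proofs are below) =====
def Claim_equal_merge_bio_dicts_py : Prop := ∀ (rows : List (List (String × Option String))), Dom_merge_bio_dicts_py rows → Spec_merge_bio_dicts_py rows (merge_bio_dicts_py rows)

-- ===== LEMMAS AND PROOFS =====

-- abbreviations used only by the proofs
def pvFMax (g : List (List (String × Option String))) : List (String × Option String) :=
  (PySem.List.max? g pvBioLen).getD []

def pvF (p : String × List (List (String × Option String))) : String × List (String × Option String) :=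
  (p.1, pvFMax p.2)

-- get? on an item list mapped through the key-preserving pvF
theorem pv_get?_map (l : List (String × List (List (String × Option String)))) (k : String) :
    (PySem.Dict.mk (l.map pvF)).get? k = ((PySem.Dict.mk l).get? k).map pvFMax := by
  induction l with
  | nil => rfl
  | cons p t ih =>
    simp only [PySem.Dict.get?, List.map_cons, List.find?] at *
    by_cases h : p.1 == k
    · simp [pvF, h]
    · simpa [pvF, h] using ih

theorem pv_contains_map (l : List (String × List (List (String × Option String)))) (k : String) :
    (PySem.Dict.mk (l.map pvF)).contains k = (PySem.Dict.mk l).contains k := by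
  rw [PySem.Dict.contains_eq_isSome_get?, PySem.Dict.contains_eq_isSome_get?, pv_get?_map]
  cases (PySem.Dict.mk l).get? k <;> rfl

-- max of a group extended on the right by one row
theorem pv_max?_append (g : List (List (String × Option String))) (m r : List (String × Option String))
    (h : PySem.List.max? g pvBioLen = some m) :
    PySem.List.max? (g ++ [r]) pvBioLen
      = if pvBioLen m < pvBioLen r then some r else some m := by
  simp [PySem.List.max?, List.foldl_append] at *
  rw [h]

-- insert commutes with the pvF mapping of the item list
theorem pv_insert_map (l : List (String × List (List (String × Option String)))) (k : String)
    (v : List (List (String × Option String))) :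
    ((PySem.Dict.mk l).insert k v).items.map pvF
      = ((PySem.Dict.mk (l.map pvF)).insert k (pvFMax v)).items := by
  simp only [PySem.Dict.insert, pv_contains_map]
  by_cases h : (PySem.Dict.mk l).contains k
  · simp only [h, if_true, List.map_map]
    apply List.map_congr_left
    intro p _
    simp only [Function.comp_apply]
    by_cases hp : p.1 == k
    · have hk : p.1 = k := beq_iff_eq.mp hp
      simp [pvF, hk]
    · simp [pvF, hp]
  · simp [h, pvF]

-- inserting the value already stored at k is the identity (unique keys)
theorem pv_insert_self (l : List (String × List (String × Option String))) (k : String)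
    (v : List (String × Option String))
    (hnd : (l.map Prod.fst).Nodup) (hget : (PySem.Dict.mk l).get? k = some v) :
    ((PySem.Dict.mk l).insert k v).items = l := by
  have hc : (PySem.Dict.mk l).contains k = true := by
    rw [PySem.Dict.contains_eq_isSome_get?, hget]; rfl
  simp only [PySem.Dict.insert, hc, if_true]
  clear hc
  induction l with
  | nil => rfl
  | cons p t ih =>
    simp only [List.map_cons, List.nodup_cons] at hnd
    simp only [PySem.Dict.get?, List.find?] at hget
    by_cases h : p.1 == k
    · have hk : p.1 = k := beq_iff_eq.mp h
      simp only [h] at hget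
      have hv : p.2 = v := by simpa using hget
      simp only [List.map_cons, h, if_true]
      refine congrArg₂ List.cons (by rw [← hk, ← hv]) ?_
      conv_rhs => rw [← List.map_id t]
      apply List.map_congr_left
      intro q hq
      have hq1 : ¬ (q.1 == k) := by
        intro hq1
        exact hnd.1 (hk ▸ (beq_iff_eq.mp hq1) ▸ List.mem_map_of_mem hq)
      simp [hq1]
    · simp only [h] at hget
      simp only [List.map_cons, h]
      refine congrArg₂ List.cons rfl ?_
      exact ih hnd.2 (by simpa [PySem.Dict.get?] using hget)

-- keys of insert: unchanged if present, appended if fresh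
theorem pv_keys_insert {ν : Type} (l : List (String × ν)) (k : String) (v : ν) :
    ((PySem.Dict.mk l).insert k v).items.map Prod.fst
      = if (PySem.Dict.mk l).contains k then l.map Prod.fst else l.map Prod.fst ++ [k] := by
  by_cases h : (PySem.Dict.mk l).contains k
  · simp only [PySem.Dict.insert, h, if_true, List.map_map]
    apply List.map_congr_left
    intro p _
    by_cases hp : p.1 = k <;> simp [hp]
  · simp [PySem.Dict.insert, h]

theorem pv_not_contains_of_get?_none {ν : Type} (l : List (String × ν)) (k : String)
    (h : (PySem.Dict.mk l).get? k = none) : (PySem.Dict.mk l).contains k = false := by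
  rw [PySem.Dict.contains_eq_isSome_get?, h]; rfl

theorem pv_mem_items_insert {ν : Type} (l : List (String × ν)) (k : String) (v : ν)
    (p : String × ν) (h : p ∈ ((PySem.Dict.mk l).insert k v).items) :
    p ∈ l ∨ p = (k, v) := by
  simp only [PySem.Dict.insert] at h
  by_cases hc : (PySem.Dict.mk l).contains k
  · rw [if_pos hc] at h
    simp only [List.mem_map] at h
    obtain ⟨q, hq, hqp⟩ := h
    by_cases hk : q.1 == k
    · right; rw [if_pos hk] at hqp; exact hqp.symm
    · left; rw [if_neg hk] at hqp; exact hqp ▸ hq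
  · rw [if_neg hc] at h
    rcases List.mem_append.mp h with h | h
    · exact .inl h
    · exact .inr (List.mem_singleton.mp h)

-- the step functions of the two folds
def pvStepA (byk : PySem.Dict String (List (String × Option String)))
    (r : List (String × Option String)) : PySem.Dict String (List (String × Option String)) :=
  let k := pvGetS r "person_name_norm"
  if k == "" then byk
  else
    match byk.get? k with
    | none => byk.insert k r
    | some prev =>
      if PySem.Str.len (pvGetS prev "bio_text") < PySem.Str.len (pvGetS r "bio_text")
      then byk.insert k r else byk

def pvStepB (g : PySem.Dict String (List (List (String × Option String))))
    (r : List (String × Option String)) : PySem.Dict String (List (List (String × Option String))) :=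
  let k := pvGetS r "person_name_norm"
  if k == "" then g
  else g.modify k [] (fun l => l ++ [r])

theorem pv_get?_mem {ν : Type} (l : List (String × ν)) (k : String) (v : ν)
    (h : (PySem.Dict.mk l).get? k = some v) : (k, v) ∈ l := by
  induction l with
  | nil => simp [PySem.Dict.get?] at h
  | cons p t ih =>
    simp only [PySem.Dict.get?, List.find?] at h
    by_cases hp : p.1 == k
    · have hk : p.1 = k := beq_iff_eq.mp hp
      simp only [hp] at h
      have hv : p.2 = v := by simpa using h
      rw [show (k, v) = p from by rw [← hk, ← hv]]
      exact List.mem_cons_self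
    · simp only [hp] at h
      exact List.mem_cons_of_mem _ (ih (by simpa [PySem.Dict.get?] using h))

theorem pv_keys_map (l : List (String × List (List (String × Option String)))) :
    (l.map pvF).map Prod.fst = l.map Prod.fst := by
  rw [List.map_map]
  apply List.map_congr_left
  intro p _
  rfl

-- main invariant: A's dict is B's group dict with every group reduced by pvFMax
theorem pv_fold_rel (rows : List (List (String × Option String))) :
    ∀ (l : List (String × List (List (String × Option String)))),
    (l.map Prod.fst).Nodup → (∀ p ∈ l, p.2 ≠ []) →
    (rows.foldl pvStepA (PySem.Dict.mk (l.map pvF))).items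
      = ((rows.foldl pvStepB (PySem.Dict.mk l)).items).map pvF := by
  induction rows with
  | nil => intro l _ _; rfl
  | cons r rows ih =>
    intro l hnd hne
    simp only [List.foldl_cons]
    by_cases hk : pvGetS r "person_name_norm" == ""
    · simp only [pvStepA, pvStepB, hk, if_true]
      exact ih l hnd hne
    · cases hget : (PySem.Dict.mk l).get? (pvGetS r "person_name_norm") with
      | none =>
        have hc := pv_not_contains_of_get?_none l _ hget
        have hA : pvStepA (PySem.Dict.mk (l.map pvF)) r
            = PySem.Dict.mk ((l ++ [(pvGetS r "person_name_norm", [r])]).map pvF) := by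
          simp only [pvStepA, hk, pv_get?_map, hget, Option.map_none,
            PySem.Dict.insert, pv_contains_map, hc]
          simp [pvF, pvFMax, PySem.List.max?]
        have hB : pvStepB (PySem.Dict.mk l) r
            = PySem.Dict.mk (l ++ [(pvGetS r "person_name_norm", [r])]) := by
          simp [pvStepB, hk, PySem.Dict.modify, PySem.Dict.getD, hget,
            PySem.Dict.insert, hc]
        rw [hA, hB]
        apply ih
        · have hfresh : pvGetS r "person_name_norm" ∉ l.map Prod.fst := by
            intro hmem
            have hct : (PySem.Dict.mk l).contains (pvGetS r "person_name_norm") = true := by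
              rw [PySem.Dict.contains_eq_decide_mem_keys]
              simpa [PySem.Dict.keys] using hmem
            rw [hc] at hct
            exact Bool.false_ne_true hct
          rw [List.map_append]
          exact List.Nodup.append hnd (List.nodup_singleton _)
            (fun a ha hb => hfresh (by rw [List.mem_singleton.mp hb] at ha; exact ha))
        · intro p hp
          rcases List.mem_append.mp hp with h | h
          · exact hne p h
          · simp at h; simp [h]
      | some grp =>
        have hgrp_ne : grp ≠ [] := hne _ (pv_get?_mem l _ _ hget)
        cases hmax : PySem.List.max? grp pvBioLen with
        | none =>
          exact absurd ((PySem.List.max?_eq_none_iff grp pvBioLen).mp hmax) hgrp_ne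
        | some m =>
          have hfm : pvFMax grp = m := by simp [pvFMax, hmax]
          have hB : pvStepB (PySem.Dict.mk l) r
              = (PySem.Dict.mk l).insert (pvGetS r "person_name_norm") (grp ++ [r]) := by
            simp [pvStepB, hk, PySem.Dict.modify, PySem.Dict.getD, hget]
          have hndB : ((((PySem.Dict.mk l).insert (pvGetS r "person_name_norm") (grp ++ [r])).items).map Prod.fst).Nodup := by
            rw [pv_keys_insert]
            have hc : (PySem.Dict.mk l).contains (pvGetS r "person_name_norm") = true := by
              rw [PySem.Dict.contains_eq_isSome_get?, hget]; rfl
            simp [hc, hnd]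
          have hneB : ∀ p ∈ (((PySem.Dict.mk l).insert (pvGetS r "person_name_norm") (grp ++ [r])).items),
              p.2 ≠ [] := by
            intro p hp
            rcases pv_mem_items_insert l _ _ p hp with h | h
            · exact hne p h
            · simp [h]
          have hIH := ih _ hndB hneB
          by_cases hlt : pvBioLen m < pvBioLen r
          · have hA : pvStepA (PySem.Dict.mk (l.map pvF)) r
                = (PySem.Dict.mk (l.map pvF)).insert (pvGetS r "person_name_norm") r := by
              unfold pvStepA
              rw [if_neg hk, pv_get?_map, hget]
              simp only [Option.map_some, hfm]
              show (if PySem.Str.len (pvGetS m "bio_text") < PySem.Str.len (pvGetS r "bio_text")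
                  then (PySem.Dict.mk (l.map pvF)).insert (pvGetS r "person_name_norm") r
                  else PySem.Dict.mk (l.map pvF)) = _
              exact if_pos hlt
            have hmapped : ((PySem.Dict.mk l).insert (pvGetS r "person_name_norm") (grp ++ [r])).items.map pvF
                = ((PySem.Dict.mk (l.map pvF)).insert (pvGetS r "person_name_norm") r).items := by
              rw [pv_insert_map]
              have : pvFMax (grp ++ [r]) = r := by
                simp [pvFMax, pv_max?_append grp m r hmax, hlt]
              rw [this]
            rw [hA, hB, show ((PySem.Dict.mk (l.map pvF)).insert (pvGetS r "person_name_norm") r)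
                  = PySem.Dict.mk ((((PySem.Dict.mk l).insert (pvGetS r "person_name_norm") (grp ++ [r])).items).map pvF) from by rw [hmapped]]
            exact hIH
          · have hA : pvStepA (PySem.Dict.mk (l.map pvF)) r = PySem.Dict.mk (l.map pvF) := by
              unfold pvStepA
              rw [if_neg hk, pv_get?_map, hget]
              simp only [Option.map_some, hfm]
              show (if PySem.Str.len (pvGetS m "bio_text") < PySem.Str.len (pvGetS r "bio_text")
                  then (PySem.Dict.mk (l.map pvF)).insert (pvGetS r "person_name_norm") r
                  else PySem.Dict.mk (l.map pvF)) = _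
              exact if_neg hlt
            have hmapped : ((PySem.Dict.mk l).insert (pvGetS r "person_name_norm") (grp ++ [r])).items.map pvF
                = l.map pvF := by
              rw [pv_insert_map]
              have hfm2 : pvFMax (grp ++ [r]) = m := by
                simp [pvFMax, pv_max?_append grp m r hmax, hlt]
              rw [hfm2]
              apply pv_insert_self
              · rw [pv_keys_map]; exact hnd
              · rw [pv_get?_map, hget, Option.map_some, hfm]
            rw [hA, hB, show PySem.Dict.mk (l.map pvF)
                  = PySem.Dict.mk ((((PySem.Dict.mk l).insert (pvGetS r "person_name_norm") (grp ++ [r])).items).map pvF) from by rw [hmapped]]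
            exact hIH

-- ===== VERDICT (by name: the statement is the Claim_ definition above) =====
theorem merge_bio_dicts_py_spec : Claim_equal_merge_bio_dicts_py := by
  unfold Claim_equal_merge_bio_dicts_py Spec_merge_bio_dicts_py
  intro rows _
  simp only [merge_bio_dicts_py, merge_bio_dicts_py_alt]
  have hA : (fun (byk : PySem.Dict String (List (String × Option String))) r =>
      let k := pvGetS r "person_name_norm"
      if k == "" then byk
      else
        match byk.get? k with
        | none => byk.insert k r
        | some prev =>
          if PySem.Str.len (pvGetS prev "bio_text") < PySem.Str.len (pvGetS r "bio_text")
          then byk.insert k r else byk) = pvStepA := rfl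
  have hB : (fun (g : PySem.Dict String (List (List (String × Option String)))) r =>
      let k := pvGetS r "person_name_norm"
      if k == "" then g
      else g.modify k [] (fun l => l ++ [r])) = pvStepB := rfl
  rw [hA, hB]
  have h := pv_fold_rel rows [] (by simp) (by simp)
  simp only [List.map_nil] at h
  congr 1
  rw [PySem.Dict.values, PySem.Dict.values, h, List.map_map, List.map_map]
  apply List.map_congr_left
  intro p _
  rfl
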